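-- pv_equiv track=rewrite | github.com/hhr346/LeetCode | 100268最长公共后缀查询/main.py | stringIndices
-- ===== SOURCE A (Python) =====
-- from typing import List
--
-- def stringIndices(wordsContainer: List[str], wordsQuery: List[str]) -> List[int]:
--     ans_list = []
--     for query in wordsQuery:
--         maxMatch_record = [count for count in range(len(wordsContainer))]
--         for i in range(len(query)):
--             maxMatch = []
--             letter = query[-i-1]
--             for idx in maxMatch_record:
--                 word = wordsContainer[idx]
--                 if len(word) >= i+1 and word[-i-1] == letter:
--                     maxMatch.append(idx)
--             if len(maxMatch) == 0:
--                 ans = maxMatch_record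
--                 break
--             elif len(maxMatch) == 1:
--                 ans = maxMatch
--                 break
--             elif i == len(query)-1:
--                 ans = maxMatch
--             maxMatch_record = maxMatch
--
--         if len(ans) == 1:
--             ans_list.extend(ans)
--         else:
--             len_comp = []
--             for idx in ans:
--                 len_comp.append(len(wordsContainer[idx]))
--             ans_list.append(ans[len_comp.index(min(len_comp))])
--     return ans_list
-- ===== SOURCE B (Python) =====
-- from typing import List
--
-- def stringIndices(wordsContainer: List[str], wordsQuery: List[str]) -> List[int]:
--     def lcs(w, q):
--         k = 0
--         for a, b in zip(reversed(w), reversed(q)):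
--             if a != b:
--                 break
--             k += 1
--         return k
--     res = []
--     for q in wordsQuery:
--         best, bl, bn = 0, lcs(wordsContainer[0], q), len(wordsContainer[0])
--         for i in range(1, len(wordsContainer)):
--             w = wordsContainer[i]
--             li = lcs(w, q)
--             if li > bl or (li == bl and len(w) < bn):
--                 best, bl, bn = i, li, len(w)
--         res.append(best)
--     return res
-- ===== Notes on version B (the rewrite author's own statement) =====
-- stated objective: simpler
-- what changed: A repeatedly filters a shrinking candidate-index list character by character from the suffix with three early-exit branches and then a separate min/index pass over lengths; B computes each word's common-suffix length directly with one helper and keeps a single running best (max suffix length, then min word length, then first index) in one pass per query.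
-- intended difference: On an empty query string that follows an earlier nonempty query, A answers with leftover loop state (it picks the first shortest word among the PREVIOUS query's best-suffix candidates) whereas B answers with the first shortest word of the whole container, which is the intended answer since an empty query shares the empty suffix with every container word. — e.g. on stringIndices(["ab", "b"], ["ab", ""]): A returns [0, 0], B returns [0, 1]
import Mathlib
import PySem

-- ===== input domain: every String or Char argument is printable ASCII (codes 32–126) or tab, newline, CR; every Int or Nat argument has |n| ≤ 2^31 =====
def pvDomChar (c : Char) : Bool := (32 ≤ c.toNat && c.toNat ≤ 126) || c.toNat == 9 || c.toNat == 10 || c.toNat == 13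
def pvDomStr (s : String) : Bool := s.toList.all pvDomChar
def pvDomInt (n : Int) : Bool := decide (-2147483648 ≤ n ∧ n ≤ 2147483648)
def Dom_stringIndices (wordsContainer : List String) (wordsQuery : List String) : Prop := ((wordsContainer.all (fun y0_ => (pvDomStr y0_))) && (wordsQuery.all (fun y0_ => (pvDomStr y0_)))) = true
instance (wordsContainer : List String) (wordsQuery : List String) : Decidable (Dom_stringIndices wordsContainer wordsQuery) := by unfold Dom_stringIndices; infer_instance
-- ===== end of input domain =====

-- B replaces A's shrinking candidate-list filtering (plus a separate min/index pass) by one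
-- running-best pass per query over direct common-suffix lengths; objective: simpler, same cost.
-- On empty tail queries A answers from stale loop state; that is declared as D_ below.

-- ===== PORT A =====
-- the comprehension's condition: len(word) >= i+1 and word[-i-1] == query[-i-1]
-- (the negative indices are in range under the two length guards, so getD is exact)
def pvCondA (wc : List String) (ql : List Char) (i : Nat) (idx : Nat) : Bool :=
  let w := (wc.getD idx "").toList
  decide (i + 1 ≤ w.length) && (w.getD (w.length - 1 - i) ' ' == ql.getD (ql.length - 1 - i) ' ')

-- the `for i in range(len(query))` loop with its three break/last-iteration branches;
-- `ans` is Python's possibly-unassigned variable (none = not yet assigned)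
def pvLoopA (wc : List String) (ql : List Char) (record : List Nat) (ans : Option (List Nat)) (i : Nat) : Option (List Nat) :=
  if _h : i < ql.length then
    let mm := record.filter (pvCondA wc ql i)
    if mm.length = 0 then some record
    else if mm.length = 1 then some mm
    else if i = ql.length - 1 then pvLoopA wc ql mm (some mm) (i + 1)
    else pvLoopA wc ql mm ans (i + 1)
  else ans
termination_by ql.length - i

-- A's tail: extend on a singleton, else ans[len_comp.index(min(len_comp))]
-- (min([]) raises ValueError in Python: that input lies outside Pre_, the port returns [])
def pvPickA (wc : List String) (ans : List Nat) : List Int :=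
  if ans.length = 1 then ans.map (fun idx => (idx : Int))
  else
    let lenComp := ans.map (fun idx => (wc.getD idx "").toList.length)
    match PySem.List.min? lenComp (fun x => x) with
    | none => []
    | some m =>
      match PySem.List.index? lenComp m with
      | none => []
      | some j => [((ans.getD j 0 : Nat) : Int)]

-- the outer `for query in wordsQuery` loop; `prev` carries Python's function-scoped `ans`
-- (none with an empty first query = UnboundLocalError in Python: outside Pre_, the port returns [])
def pvGoA (wc : List String) (qs : List String) (prev : Option (List Nat)) : List Int :=
  match qs with
  | [] => []
  | q :: rest =>
    match pvLoopA wc q.toList (List.range wc.length) prev 0 with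
    | none => []
    | some a => pvPickA wc a ++ pvGoA wc rest (some a)

def stringIndices (wordsContainer : List String) (wordsQuery : List String) : List Int :=
  pvGoA wordsContainer wordsQuery none

-- ===== PORT B =====
-- lcs(w, q): the `for a, b in zip(reversed(w), reversed(q))` loop with its break, accumulator k
def pvLcsGo : List (Char × Char) → Nat → Nat
  | [], k => k
  | p :: t, k => if p.1 ≠ p.2 then k else pvLcsGo t (k + 1)

def pvLcs (w q : String) : Nat :=
  pvLcsGo (w.toList.reverse.zip q.toList.reverse) 0

-- the inner `for i in range(1, len(wordsContainer))` loop over state (best, bl, bn);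
-- wordsContainer[0] raises IndexError on an empty container: outside Pre_ (getD is exact otherwise)
def pvBestFor (wc : List String) (q : String) : Int :=
  let w0 := wc.getD 0 ""
  let st := (PySem.List.pyRange 1 (wc.length : Int) 1).foldl
    (fun (st : Int × Nat × Nat) i =>
      let w := PySem.List.pyGetD wc i ""
      let li := pvLcs w q
      if st.2.1 < li ∨ (li = st.2.1 ∧ w.toList.length < st.2.2) then (i, li, w.toList.length) else st)
    ((0 : Int), pvLcs w0 q, w0.toList.length)
  st.1

-- the outer `for q in wordsQuery` loop appending to `res`
def stringIndices_alt (wordsContainer : List String) (wordsQuery : List String) : List Int :=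
  wordsQuery.foldl (fun res q => res ++ [pvBestFor wordsContainer q]) []

-- ===== PRECONDITION & SPEC =====
-- Pre_ excludes exactly the inputs where the Python A raises: an empty container with a
-- nonempty query list (ValueError from min([]) / UnboundLocalError) and an empty FIRST query
-- (UnboundLocalError: `ans` is read before any assignment).
def Pre_stringIndices (wordsContainer : List String) (wordsQuery : List String) : Prop :=
  wordsQuery = [] ∨ (wordsContainer ≠ [] ∧ wordsQuery.head? ≠ some "")
instance (wordsContainer : List String) (wordsQuery : List String) : Decidable (Pre_stringIndices wordsContainer wordsQuery) := by unfold Pre_stringIndices; infer_instance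

def pvWitness_stringIndices : List String × List String := (["a", "bb"], ["b", "c"])

-- spec-level data used only to STATE the change region D_ (independent of both ports):
-- common-suffix length of two strings, as the matching prefix of their reversals
def pvSuf (w q : String) : Nat :=
  ((w.toList.reverse.zipWith (· == ·) q.toList.reverse).takeWhile id).length

-- "some container word shares a longer suffix with q than the first shortest word does"
def pvMis (wc : List String) (q : String) : Bool :=
  wc.any fun w => pvSuf ((PySem.List.min? wc (·.toList.length)).getD "") q < pvSuf w q

-- On an empty query that follows an earlier nonempty query, A answers from leftover loop state
-- (first shortest word among the PREVIOUS query's best-suffix candidates) while B answers with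
-- the first shortest word of the whole container — the intended answer, since an empty query
-- shares the empty suffix with every word; D_ holds exactly when some such stale answer differs
-- (the fold carries the last nonempty query seen so far and the mismatch flag).
def D_stringIndices (wordsContainer : List String) (wordsQuery : List String) : Prop :=
  (wordsQuery.foldl (fun p q =>
    if q = "" then (p.1, p.2 || pvMis wordsContainer p.1) else (q, p.2)) ("", false)).2 = true
instance (wordsContainer : List String) (wordsQuery : List String) : Decidable (D_stringIndices wordsContainer wordsQuery) := by unfold D_stringIndices; infer_instance

def Spec_stringIndices (wordsContainer : List String) (wordsQuery : List String) (out : List Int) : Prop := ¬ D_stringIndices wordsContainer wordsQuery → out = stringIndices_alt wordsContainer wordsQuery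
instance (wordsContainer : List String) (wordsQuery : List String) (out : List Int) : Decidable (Spec_stringIndices wordsContainer wordsQuery out) := by unfold Spec_stringIndices; infer_instance

def pvDiffWitness_stringIndices : List String × List String := (["ab", "b"], ["ab", ""])
def pvDiffWitnessOut_stringIndices : (List Int) × (List Int) := ([0, 0], [0, 1])

-- ===== CLAIM (what is proved, stated in full; the proofs are below) =====
def Claim_unchanged_stringIndices : Prop := ∀ (wordsContainer : List String) (wordsQuery : List String), Dom_stringIndices wordsContainer wordsQuery → Pre_stringIndices wordsContainer wordsQuery → Spec_stringIndices wordsContainer wordsQuery (stringIndices wordsContainer wordsQuery)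
def Claim_changed_stringIndices : Prop := Dom_stringIndices (pvDiffWitness_stringIndices.1) (pvDiffWitness_stringIndices.2) ∧ Pre_stringIndices (pvDiffWitness_stringIndices.1) (pvDiffWitness_stringIndices.2) ∧ D_stringIndices (pvDiffWitness_stringIndices.1) (pvDiffWitness_stringIndices.2) ∧ stringIndices (pvDiffWitness_stringIndices.1) (pvDiffWitness_stringIndices.2) = pvDiffWitnessOut_stringIndices.1 ∧ stringIndices_alt (pvDiffWitness_stringIndices.1) (pvDiffWitness_stringIndices.2) = pvDiffWitnessOut_stringIndices.2 ∧ pvDiffWitnessOut_stringIndices.1 ≠ pvDiffWitnessOut_stringIndices.2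
def Claim_exact_stringIndices : Prop := ∀ (wordsContainer : List String) (wordsQuery : List String), Dom_stringIndices wordsContainer wordsQuery → Pre_stringIndices wordsContainer wordsQuery → D_stringIndices wordsContainer wordsQuery → stringIndices wordsContainer wordsQuery ≠ stringIndices_alt wordsContainer wordsQuery

-- ===== LEMMAS AND PROOFS =====

-- the per-index data of a fixed (wc, q) instance
def pvL (wc : List String) (q : String) (idx : Nat) : Nat := pvLcs (wc.getD idx "") q
def pvW (wc : List String) (idx : Nat) : Nat := (wc.getD idx "").toList.length

-- "idx a is at least as good an answer as idx b": longer common suffix, then shorter word, then smaller index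
def pvKle (wc : List String) (q : String) (a b : Nat) : Prop :=
  pvL wc q b < pvL wc q a ∨
    (pvL wc q a = pvL wc q b ∧ (pvW wc a < pvW wc b ∨ (pvW wc a = pvW wc b ∧ a ≤ b)))

def pvIsBest (wc : List String) (q : String) (p : Nat) : Prop :=
  p < wc.length ∧ ∀ x, x < wc.length → pvKle wc q p x

-- "p is the first element of S whose word is shortest" (for ascending S)
def pvFM (wc : List String) (S : List Nat) (p : Nat) : Prop :=
  p ∈ S ∧ ∀ x ∈ S, pvW wc p < pvW wc x ∨ (pvW wc p = pvW wc x ∧ p ≤ x)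

-- first index of S whose word is shortest (proof-side model of A's pick and of min?)
def pvFsh (wc : List String) (S : List Nat) : Nat :=
  match S with
  | [] => 0
  | a :: t => t.foldl (fun b x => if (wc.getD x "").toList.length < (wc.getD b "").toList.length then x else b) a

-- structural model of B's lcs loop: matching prefix length of the two reversed lists
def pvLcsRev : List Char → List Char → Nat
  | a :: as, b :: bs => if a = b then pvLcsRev as bs + 1 else 0
  | _, _ => 0

theorem pvLcsGo_eq (ra : List Char) : ∀ (rb : List Char) (k : Nat),
    pvLcsGo (ra.zip rb) k = k + pvLcsRev ra rb := by
  induction ra with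
  | nil => intro rb k; simp [pvLcsGo, pvLcsRev]
  | cons a as ih =>
    intro rb k
    cases rb with
    | nil => simp [pvLcsGo, pvLcsRev]
    | cons b bs =>
      simp only [List.zip_cons_cons, pvLcsGo, pvLcsRev]
      by_cases h : a = b
      · simp [h, ih bs]
        omega
      · simp [h]

theorem pvLcs_eq (w q : String) : pvLcs w q = pvLcsRev w.toList.reverse q.toList.reverse := by
  unfold pvLcs
  rw [pvLcsGo_eq]
  omega

theorem pvL_eq (wc : List String) (q : String) (idx : Nat) :
    pvL wc q idx = pvLcsRev (wc.getD idx "").toList.reverse q.toList.reverse :=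
  pvLcs_eq _ _

-- the candidate set after i suffix characters have matched, as A's loop keeps it
def pvS (wc : List String) (q : String) (i : Nat) : List Nat :=
  (List.range wc.length).filter (fun idx => decide (i ≤ pvL wc q idx))

-- the maximal common-suffix length over the container
def pvM (wc : List String) (q : String) : Nat :=
  ((List.range wc.length).map (pvL wc q)).foldl max 0

theorem pvKle_refl (wc : List String) (q : String) (a : Nat) : pvKle wc q a a := by
  unfold pvKle; omega

theorem pvKle_trans (wc : List String) (q : String) {a b c : Nat}
    (h1 : pvKle wc q a b) (h2 : pvKle wc q b c) : pvKle wc q a c := by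
  unfold pvKle at *; omega

theorem pvKle_antisymm (wc : List String) (q : String) {a b : Nat}
    (h1 : pvKle wc q a b) (h2 : pvKle wc q b a) : a = b := by
  unfold pvKle at *; omega

theorem pvFM_unique (wc : List String) {S : List Nat} {p p' : Nat}
    (h1 : pvFM wc S p) (h2 : pvFM wc S p') : p = p' := by
  have a := h1.2 p' h2.1
  have b := h2.2 p h1.1
  omega

theorem pvLcsRev_le_right (ra rb : List Char) : pvLcsRev ra rb ≤ rb.length := by
  induction ra generalizing rb with
  | nil => simp [pvLcsRev]
  | cons a as ih =>
    cases rb with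
    | nil => simp [pvLcsRev]
    | cons b bs =>
      simp only [pvLcsRev]
      split_ifs with h
      · simpa using ih bs
      · simp

theorem pvLcsRev_succ_iff (ra rb : List Char) (i : Nat) :
    i + 1 ≤ pvLcsRev ra rb ↔
      i ≤ pvLcsRev ra rb ∧ i < ra.length ∧ i < rb.length ∧ ra.getD i ' ' = rb.getD i ' ' := by
  induction ra generalizing rb i with
  | nil => simp [pvLcsRev]
  | cons a as ih =>
    cases rb with
    | nil => simp [pvLcsRev]
    | cons b bs =>
      cases i with
      | zero =>
        simp only [pvLcsRev]
        split_ifs with h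
        · simp [h]
        · simp [h]
      | succ i =>
        simp only [pvLcsRev]
        split_ifs with h
        · have := ih bs i
          simp only [List.length_cons, List.getD_cons_succ]
          constructor
          · intro hle
            have h1 : i + 1 ≤ pvLcsRev as bs := by omega
            have := (ih bs i).mp h1
            exact ⟨by omega, by omega, by omega, this.2.2.2⟩
          · intro ⟨h1, h2, h3, h4⟩
            have : i + 1 ≤ pvLcsRev as bs := (ih bs i).mpr ⟨by omega, by omega, by omega, h4⟩
            omega
        · simp

theorem pvRevGetD (l : List Char) (i : Nat) (h : i < l.length) :
    l.reverse.getD i ' ' = l.getD (l.length - 1 - i) ' ' := by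
  rw [List.getD_eq_getElem l.reverse ' ' (by simpa using h),
      List.getD_eq_getElem l ' ' (by omega)]
  exact List.getElem_reverse _

-- A's step-i filter condition, on a surviving index, tests exactly "one more suffix char matches"
theorem pvCondA_iff (wc : List String) (q : String) (i : Nat) (hi : i < q.toList.length)
    (idx : Nat) (hidx : i ≤ pvL wc q idx) :
    pvCondA wc q.toList i idx = true ↔ i + 1 ≤ pvL wc q idx := by
  have hlen : q.toList.reverse.length = q.toList.length := by simp
  have hiff := pvLcsRev_succ_iff ((wc.getD idx "").toList.reverse) (q.toList.reverse) i
  simp only [pvCondA, Bool.and_eq_true, decide_eq_true_eq, beq_iff_eq]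
  rw [pvL_eq] at hidx
  rw [show (i + 1 ≤ pvL wc q idx) = (i + 1 ≤ pvLcsRev (wc.getD idx "").toList.reverse q.toList.reverse) from by rw [pvL_eq]]
  constructor
  · intro ⟨h1, h2⟩
    refine hiff.mpr ⟨hidx, by simpa using (by omega : i < (wc.getD idx "").toList.length), by simpa using hi, ?_⟩
    rw [pvRevGetD _ _ (by omega), pvRevGetD _ _ (by simpa using hi)]
    exact h2
  · intro h
    obtain ⟨_, hwa, hqa, heq⟩ := hiff.mp h
    have hw : i < (wc.getD idx "").toList.length := by simpa using hwa
    refine ⟨by omega, ?_⟩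
    rw [pvRevGetD _ _ hw, pvRevGetD _ _ (by simpa using hi)] at heq
    exact heq

theorem pvL_le_M (wc : List String) (q : String) (x : Nat) (hx : x < wc.length) :
    pvL wc q x ≤ pvM wc q := by
  have hmem : pvL wc q x ∈ (List.range wc.length).map (pvL wc q) :=
    List.mem_map.mpr ⟨x, List.mem_range.mpr hx, rfl⟩
  exact (PySem.List.le_foldl_max _ 0).2 _ hmem

theorem pvM_mem (wc : List String) (q : String) (hn : 0 < wc.length) :
    ∃ p, p < wc.length ∧ pvL wc q p = pvM wc q := by
  rcases PySem.List.foldl_max_mem ((List.range wc.length).map (pvL wc q)) 0 with h | h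
  · refine ⟨0, hn, ?_⟩
    have h1 := pvL_le_M wc q 0 hn
    unfold pvM at *
    omega
  · obtain ⟨p, hp, hpv⟩ := List.mem_map.mp h
    exact ⟨p, List.mem_range.mp hp, hpv⟩

theorem pvM_le (wc : List String) (q : String) (hn : 0 < wc.length) : pvM wc q ≤ q.toList.length := by
  obtain ⟨p, hp, hpv⟩ := pvM_mem wc q hn
  rw [← hpv, pvL_eq]
  have h := pvLcsRev_le_right ((wc.getD p "").toList.reverse) (q.toList.reverse)
  simpa using h

theorem pvS_filter (wc : List String) (q : String) (i : Nat) (hi : i < q.toList.length) :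
    (pvS wc q i).filter (pvCondA wc q.toList i) = pvS wc q (i + 1) := by
  unfold pvS
  rw [List.filter_filter]
  apply List.filter_congr
  intro idx hidx
  by_cases hle : i ≤ pvL wc q idx
  · by_cases hc : pvCondA wc q.toList i idx = true
    · have := (pvCondA_iff wc q i hi idx hle).mp hc
      simp [hc, hle, this]
    · have : ¬ (i + 1 ≤ pvL wc q idx) := fun h => hc ((pvCondA_iff wc q i hi idx hle).mpr h)
      simp [hle, hc, this]
  · have : ¬ (i + 1 ≤ pvL wc q idx) := by omega
    simp [hle, this]

theorem pvS_subfilter (wc : List String) (q : String) {i j : Nat} (hij : i ≤ j) :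
    (pvS wc q i).filter (fun idx => decide (j ≤ pvL wc q idx)) = pvS wc q j := by
  unfold pvS
  rw [List.filter_filter]
  apply List.filter_congr
  intro idx _
  by_cases hle : j ≤ pvL wc q idx
  · have : i ≤ pvL wc q idx := by omega
    simp [hle, this]
  · simp [hle]

theorem pvS_mem (wc : List String) (q : String) {i x : Nat} :
    x ∈ pvS wc q i ↔ x < wc.length ∧ i ≤ pvL wc q x := by
  simp [pvS, List.mem_filter, List.mem_range]

theorem pvS_nonempty (wc : List String) (q : String) (hn : 0 < wc.length) {i : Nat}
    (hi : i ≤ pvM wc q) : pvS wc q i ≠ [] := by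
  obtain ⟨p, hp, hpv⟩ := pvM_mem wc q hn
  have : p ∈ pvS wc q i := pvS_mem wc q |>.mpr ⟨hp, by omega⟩
  exact List.ne_nil_of_mem this

theorem pvS_pairwise (wc : List String) (q : String) (i : Nat) :
    (pvS wc q i).Pairwise (· < ·) := by
  exact List.Pairwise.sublist List.filter_sublist (List.pairwise_lt_range)

theorem pvLoopA_eq (wc : List String) (q : String) (hn : 0 < wc.length) (i : Nat)
    (hi : i < q.toList.length) (hiM : i ≤ pvM wc q) (ans : Option (List Nat)) :
    pvLoopA wc q.toList (pvS wc q i) ans i = some (pvS wc q (pvM wc q)) := by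
  have hMle := pvM_le wc q hn
  suffices H : ∀ k i ans, q.toList.length - i = k → i < q.toList.length → i ≤ pvM wc q →
      pvLoopA wc q.toList (pvS wc q i) ans i = some (pvS wc q (pvM wc q)) by
    exact H _ i ans rfl hi hiM
  intro k
  induction k with
  | zero => intro i ans hk hi _; omega
  | succ k ih =>
    intro i ans hk hi hiM
    have hgrow : pvS wc q (i + 1) ≠ [] → i + 1 ≤ pvM wc q := by
      intro hne
      obtain ⟨x, hx⟩ := List.exists_mem_of_ne_nil _ hne
      have h := (pvS_mem wc q).mp hx
      have := pvL_le_M wc q x h.1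
      omega
    rw [pvLoopA, dif_pos hi]
    simp only [pvS_filter wc q i hi]
    by_cases h0 : (pvS wc q (i + 1)).length = 0
    · rw [if_pos h0]
      have hM0 : ¬ (i + 1 ≤ pvM wc q) := fun hle =>
        pvS_nonempty wc q hn hle (List.length_eq_zero_iff.mp h0)
      have hMi : pvM wc q = i := by omega
      rw [hMi]
    · by_cases h1 : (pvS wc q (i + 1)).length = 1
      · rw [if_neg h0, if_pos h1]
        obtain ⟨x, hx⟩ := List.length_eq_one_iff.mp h1
        have hi1M : i + 1 ≤ pvM wc q := hgrow (by simp [hx])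
        have hsub := pvS_subfilter wc q hi1M
        have hne := pvS_nonempty wc q hn (le_refl (pvM wc q))
        rw [hx] at hsub
        rw [hx]
        by_cases hMx : pvM wc q ≤ pvL wc q x
        · rw [← hsub]; simp [hMx]
        · exfalso; apply hne; rw [← hsub]; simp [hMx]
      · by_cases h2 : i = q.toList.length - 1
        · rw [if_neg h0, if_neg h1, if_pos h2]
          have hstop : ¬ (i + 1 < q.toList.length) := by omega
          rw [pvLoopA, dif_neg hstop]
          have hi1M : i + 1 ≤ pvM wc q := hgrow (fun h => h0 (by simp [h]))
          have hMi : pvM wc q = i + 1 := by omega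
          rw [hMi]
        · rw [if_neg h0, if_neg h1, if_neg h2]
          exact ih (i + 1) ans (by omega) (by omega) (hgrow (fun h => h0 (by simp [h])))

-- pvFsh computes the first-shortest element of an ascending list
theorem pvFsh_FM (wc : List String) (S : List Nat) (hne : S ≠ [])
    (hpw : S.Pairwise (· < ·)) : pvFM wc S (pvFsh wc S) := by
  cases S with
  | nil => exact absurd rfl hne
  | cons a t =>
    clear hne
    induction t generalizing a with
    | nil =>
      refine ⟨by simp [pvFsh], ?_⟩
      intro x hx
      simp only [List.mem_singleton] at hx
      subst hx
      right; exact ⟨rfl, le_refl _⟩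
    | cons b t' ih =>
      have hab : a < b := (List.pairwise_cons.mp hpw).1 b (by simp)
      have hpw' : ∀ c, c = a ∨ c = b → (c :: t').Pairwise (· < ·) := by
        intro c hc
        have h1 := List.pairwise_cons.mp hpw
        have h2 := List.pairwise_cons.mp h1.2
        refine List.pairwise_cons.mpr ⟨?_, h2.2⟩
        intro y hy
        rcases hc with rfl | rfl
        · exact h1.1 y (by simp [hy])
        · exact h2.1 y hy
      have hstep : pvFsh wc (a :: b :: t') =
          pvFsh wc ((if (wc.getD b "").toList.length < (wc.getD a "").toList.length then b else a) :: t') := by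
        simp only [pvFsh, List.foldl_cons]
      rw [hstep]
      split_ifs with hba
      · have hFM := ih b (hpw' b (Or.inr rfl))
        refine ⟨?_, ?_⟩
        · have := hFM.1
          rcases List.mem_cons.mp this with h | h
          · rw [h]; simp
          · simp [List.mem_cons, h]
        · intro x hx
          rcases List.mem_cons.mp hx with rfl | hx'
          · have hvb := hFM.2 b (by simp)
            unfold pvW at *
            omega
          · exact hFM.2 x hx'
      · have hFM := ih a (hpw' a (Or.inl rfl))
        refine ⟨?_, ?_⟩
        · have := hFM.1
          rcases List.mem_cons.mp this with h | h
          · rw [h]; simp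
          · simp [List.mem_cons, h]
        · intro x hx
          rcases List.mem_cons.mp hx with rfl | hx'
          · exact hFM.2 x (by simp)
          · rcases List.mem_cons.mp hx' with rfl | hx'' <;>
            · first
              | (have hva := hFM.2 a (by simp)
                 unfold pvW at *
                 omega)
              | exact hFM.2 _ (by simp [hx''])

-- A's pick step returns exactly the first-shortest element of an ascending candidate list
theorem pvPickA_eq_fsh (wc : List String) (S : List Nat) (hne : S ≠ [])
    (hpw : S.Pairwise (· < ·)) : pvPickA wc S = [((pvFsh wc S : Nat) : Int)] := by
  have hFMf := pvFsh_FM wc S hne hpw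
  by_cases h1 : S.length = 1
  · obtain ⟨x, hx⟩ := List.length_eq_one_iff.mp h1
    subst hx
    have hfx : pvFsh wc [x] = x := by simpa using hFMf.1
    unfold pvPickA
    rw [if_pos h1, hfx]
    simp
  · unfold pvPickA
    rw [if_neg h1]
    have hlc : S.map (fun idx => (wc.getD idx "").toList.length) = S.map (pvW wc) := rfl
    rw [hlc]
    have hlcne : S.map (pvW wc) ≠ [] := by simpa using hne
    obtain ⟨m, hm⟩ : ∃ m, PySem.List.min? (S.map (pvW wc)) (fun x => x) = some m := by
      cases hmin : PySem.List.min? (S.map (pvW wc)) (fun x => x) with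
      | none => exact absurd ((PySem.List.min?_eq_none_iff _ _).mp hmin) hlcne
      | some m => exact ⟨m, rfl⟩
    have hmmem : m ∈ S.map (pvW wc) := PySem.List.min?_mem hm
    obtain ⟨j, hj⟩ : ∃ j, PySem.List.index? (S.map (pvW wc)) m = some j := by
      cases hidx : PySem.List.index? (S.map (pvW wc)) m with
      | none => exact absurd hmmem (by rw [← PySem.List.index?_isSome_iff, hidx]; simp)
      | some j => exact ⟨j, rfl⟩
    obtain ⟨hjlt, hjval, hjfirst⟩ := PySem.List.getElem_of_index?_eq_some hj
    have hjS : j < S.length := by simpa using hjlt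
    simp only [hm, hj]
    have hFMj : pvFM wc S S[j] := by
      refine ⟨List.getElem_mem hjS, ?_⟩
      intro y hy
      have hWj : pvW wc S[j] = m := by simpa using hjval
      have hWy : m ≤ pvW wc y :=
        PySem.List.min?_isMin hm _ (List.mem_map.mpr ⟨y, hy, rfl⟩)
      by_cases hWeq : pvW wc y = m
      · obtain ⟨jy, hjy, hjyv⟩ := List.mem_iff_getElem.mp hy
        have hjyval : (S.map (pvW wc))[jy]'(by simpa using hjy) = m := by
          simp [hjyv, hWeq]
        have hjle : j ≤ jy := by
          by_contra hlt
          exact hjfirst jy (by simpa using (by omega : jy < j)) hjyval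
        have hple : S[j] ≤ y := by
          rcases Nat.eq_or_lt_of_le hjle with heq | hlt
          · subst heq
            have : S[j] = y := by rw [← hjyv]
            omega
          · have hpw2 := List.pairwise_iff_getElem.mp hpw j jy hjS hjy hlt
            have : S[jy] = y := by rw [← hjyv]
            omega
        right
        exact ⟨by omega, hple⟩
      · left; omega
    have : S[j] = pvFsh wc S := pvFM_unique wc hFMj hFMf
    rw [List.getD_eq_getElem S 0 hjS, this]

theorem pvBestFor_best (wc : List String) (q : String) (hn : 0 < wc.length) :
    ∃ b, pvIsBest wc q b ∧ pvBestFor wc q = (b : Int) := by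
  have H : ∀ k, 1 ≤ k → k ≤ wc.length → ∃ b, b < k ∧ (∀ x, x < k → pvKle wc q b x) ∧
      (PySem.List.pyRange 1 (k : Int) 1).foldl
        (fun (st : Int × Nat × Nat) i =>
          let w := PySem.List.pyGetD wc i ""
          let li := pvLcs w q
          if st.2.1 < li ∨ (li = st.2.1 ∧ w.toList.length < st.2.2) then (i, li, w.toList.length) else st)
        ((0 : Int), pvLcs (wc.getD 0 "") q, (wc.getD 0 "").toList.length)
        = ((b : Int), pvL wc q b, pvW wc b) := by
    intro k
    induction k with
    | zero => intro h; omega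
    | succ k ih =>
      intro _ hle
      by_cases hk0 : k = 0
      · subst hk0
        refine ⟨0, by omega, ?_, ?_⟩
        · intro x hx
          have : x = 0 := by omega
          subst this
          exact pvKle_refl wc q 0
        · rw [show ((0 + 1 : Nat) : Int) = 1 by norm_num,
              PySem.List.pyRange_one_eq_nil (by norm_num)]
          simp [pvL, pvW]
      · have hk1 : 1 ≤ k := by omega
        obtain ⟨b, hbk, hbbest, hbeq⟩ := ih hk1 (by omega)
        have hcast : ((k + 1 : Nat) : Int) = (k : Int) + 1 := by push_cast; ring
        rw [hcast, PySem.List.pyRange_one_succ_right (by exact_mod_cast hk1), List.foldl_append,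
            hbeq]
        simp only [List.foldl_cons, List.foldl_nil, PySem.List.pyGetD_natCast]
        by_cases hcond : pvL wc q b < pvLcs (wc.getD k "") q ∨
            (pvLcs (wc.getD k "") q = pvL wc q b ∧ (wc.getD k "").toList.length < pvW wc b)
        · rw [if_pos hcond]
          have hcond' : pvL wc q b < pvL wc q k ∨
              (pvL wc q k = pvL wc q b ∧ pvW wc k < pvW wc b) := hcond
          refine ⟨k, by omega, ?_, rfl⟩
          intro x hx
          rcases Nat.lt_succ_iff_lt_or_eq.mp hx with hx | hx
          · exact pvKle_trans wc q (show pvKle wc q k b by unfold pvKle; omega) (hbbest x hx)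
          · subst hx; exact pvKle_refl wc q x
        · rw [if_neg hcond]
          have hcond' : ¬ (pvL wc q b < pvL wc q k ∨
              (pvL wc q k = pvL wc q b ∧ pvW wc k < pvW wc b)) := hcond
          refine ⟨b, by omega, ?_, rfl⟩
          intro x hx
          rcases Nat.lt_succ_iff_lt_or_eq.mp hx with hx | hx
          · exact hbbest x hx
          · subst hx
            unfold pvKle
            omega
  obtain ⟨b, hb, hbest, heq⟩ := H wc.length hn le_rfl
  refine ⟨b, ⟨hb, hbest⟩, ?_⟩
  unfold pvBestFor
  simp only [heq]

theorem pvLoop_full (wc : List String) (q : String) (hn : wc ≠ []) (hq : q ≠ "")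
    (prev : Option (List Nat)) :
    pvLoopA wc q.toList (List.range wc.length) prev 0 = some (pvS wc q (pvM wc q)) := by
  have hn' : 0 < wc.length := List.length_pos_iff.mpr hn
  have hq' : 0 < q.toList.length := by
    have : q.toList ≠ [] := by simp [String.toList_eq_nil_iff, hq]
    exact List.length_pos_iff.mpr this
  have hrange : List.range wc.length = pvS wc q 0 := by unfold pvS; simp
  rw [hrange, pvLoopA_eq wc q hn' 0 hq' (by omega) prev]

-- S wc q (M wc q): the candidate list A ends a nonempty query q with
theorem pvSM_nonempty (wc : List String) (q : String) (hn : wc ≠ []) :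
    pvS wc q (pvM wc q) ≠ [] :=
  pvS_nonempty wc q (List.length_pos_iff.mpr hn) (le_refl _)

-- B's per-query answer equals the first-shortest element of that candidate list
theorem pvBestFor_eq_fsh (wc : List String) (q : String) (hn : wc ≠ []) :
    pvBestFor wc q = ((pvFsh wc (pvS wc q (pvM wc q)) : Nat) : Int) := by
  have hn' : 0 < wc.length := List.length_pos_iff.mpr hn
  obtain ⟨b, hbb, hbeq⟩ := pvBestFor_best wc q hn'
  have hpick := pvPickA_eq_fsh wc (pvS wc q (pvM wc q)) (pvSM_nonempty wc q hn)
    (pvS_pairwise wc q (pvM wc q))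
  -- fsh (S q (M q)) satisfies pvIsBest, so it equals b
  have hFM := pvFsh_FM wc (pvS wc q (pvM wc q)) (pvSM_nonempty wc q hn)
    (pvS_pairwise wc q (pvM wc q))
  set f := pvFsh wc (pvS wc q (pvM wc q)) with hf
  have hfmem := (pvS_mem wc q).mp hFM.1
  have hfL : pvL wc q f = pvM wc q :=
    le_antisymm (pvL_le_M wc q f hfmem.1) hfmem.2
  have hbest : pvIsBest wc q f := by
    refine ⟨hfmem.1, ?_⟩
    intro y hy
    by_cases hyM : pvM wc q ≤ pvL wc q y
    · have hyS : y ∈ pvS wc q (pvM wc q) := (pvS_mem wc q).mpr ⟨hy, hyM⟩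
      have := hFM.2 y hyS
      have hyL : pvL wc q y = pvM wc q := le_antisymm (pvL_le_M wc q y hy) hyM
      unfold pvKle
      omega
    · unfold pvKle
      omega
  have : b = f := pvKle_antisymm wc q (hbb.2 f hbest.1) (hbest.2 b hbb.1)
  rw [hbeq, this]

theorem pvLcsRev_nil_right (ra : List Char) : pvLcsRev ra [] = 0 := by
  cases ra <;> rfl

theorem pvL_empty (wc : List String) (idx : Nat) : pvL wc "" idx = 0 := by
  rw [pvL_eq, show ("" : String).toList = [] from rfl]
  exact pvLcsRev_nil_right _

theorem pvM_empty (wc : List String) : pvM wc "" = 0 := by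
  rcases Nat.eq_zero_or_pos wc.length with h | h
  · unfold pvM; rw [h]; rfl
  · obtain ⟨p, _, hpv⟩ := pvM_mem wc "" h
    rw [← hpv, pvL_empty]

theorem pvS_zero (wc : List String) (q : String) : pvS wc q 0 = List.range wc.length := by
  unfold pvS; simp

-- the spec-level suffix length used by D_ agrees with B's helper
theorem pvSuf_eq (w q : String) : pvSuf w q = pvLcs w q := by
  rw [pvLcs_eq]
  unfold pvSuf
  generalize w.toList.reverse = ra
  generalize q.toList.reverse = rb
  induction ra generalizing rb with
  | nil => cases rb <;> simp [pvLcsRev]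
  | cons a as ih =>
    cases rb with
    | nil => simp [pvLcsRev]
    | cons b bs =>
      simp only [List.zipWith_cons_cons, List.takeWhile_cons, pvLcsRev]
      by_cases h : a = b
      · simp [h, ih bs]
      · simp [h]

-- PySem's min? keeps the FIRST strict-minimum: it is the fold that replaces only on <
theorem pvMin?_cons_fold {α : Type} (key : α → Nat) (x : α) (t : List α) :
    PySem.List.min? (x :: t) key = some (t.foldl (fun b y => if key y < key b then y else b) x) := by
  have H : ∀ (t : List α) (x : α),
      List.foldl (fun acc y => match acc with
        | none => some y
        | some m => if key y < key m then some y else some m) (some x) t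
      = some (t.foldl (fun b y => if key y < key b then y else b) x) := by
    intro t
    induction t with
    | nil => intro x; rfl
    | cons y t ih =>
      intro x
      simp only [List.foldl_cons]
      split_ifs with h
      · exact ih y
      · exact ih x
  simpa [PySem.List.min?] using H t x

-- the word-level first-min fold is the getD image of the index-level one
theorem pvFold_getD (wc : List String) (l : List Nat) (a : Nat) :
    (l.map fun i => wc.getD i "").foldl
        (fun b y => if y.toList.length < b.toList.length then y else b) (wc.getD a "")
      = wc.getD (l.foldl (fun b i =>
          if (wc.getD i "").toList.length < (wc.getD b "").toList.length then i else b) a) "" := by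
  induction l generalizing a with
  | nil => rfl
  | cons i l ih =>
    simp only [List.map_cons, List.foldl_cons]
    rw [show (if (wc.getD i "").toList.length < (wc.getD a "").toList.length
          then wc.getD i "" else wc.getD a "")
      = wc.getD (if (wc.getD i "").toList.length < (wc.getD a "").toList.length then i else a) ""
      from by split_ifs <;> rfl]
    exact ih _

theorem pvMap_getD_range (t : List String) :
    (List.range t.length).map (fun i => t.getD i "") = t := by
  apply List.ext_getElem
  · simp
  · intro i h1 h2
    simp [List.getD, List.getElem?_eq_getElem h2]

-- min? over the words returns the word at A/B's fresh first-shortest index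
theorem pvMin?_eq_fsh (wc : List String) (hn : wc ≠ []) :
    PySem.List.min? wc (fun w => w.toList.length)
      = some (wc.getD (pvFsh wc (List.range wc.length)) "") := by
  cases wc with
  | nil => exact absurd rfl hn
  | cons x t =>
    rw [pvMin?_cons_fold]
    have hr : List.range (x :: t).length = 0 :: (List.range t.length).map (· + 1) := by
      simpa using (List.range_succ_eq_map (n := t.length))
    rw [show pvFsh (x :: t) (List.range (x :: t).length)
        = ((List.range t.length).map (· + 1)).foldl (fun b i =>
            if ((x :: t).getD i "").toList.length < ((x :: t).getD b "").toList.length then i else b) 0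
      from by rw [hr]; rfl]
    rw [← pvFold_getD (x :: t) ((List.range t.length).map (· + 1)) 0]
    have hmap : (((List.range t.length).map (· + 1)).map fun i => (x :: t).getD i "") = t := by
      rw [List.map_map]
      have : ((fun i => (x :: t).getD i "") ∘ (· + 1)) = fun i => t.getD i "" := by
        funext i; rfl
      rw [this, pvMap_getD_range]
    rw [hmap]
    rfl

-- membership in wc at the level of indices
theorem pvMem_iff (wc : List String) (w : String) :
    w ∈ wc ↔ ∃ i, i < wc.length ∧ wc.getD i "" = w := by
  constructor
  · intro h
    obtain ⟨i, hi, hv⟩ := List.mem_iff_getElem.mp h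
    exact ⟨i, hi, by rw [List.getD_eq_getElem wc "" hi, hv]⟩
  · intro ⟨i, hi, hv⟩
    rw [← hv, List.getD_eq_getElem wc "" hi]
    exact List.getElem_mem hi

-- D_'s mismatch test is exactly "A's stale pick differs from the fresh pick"
theorem pvMis_iff (wc : List String) (q : String) (hn : wc ≠ []) :
    pvMis wc q = false ↔
      pvFsh wc (pvS wc q (pvM wc q)) = pvFsh wc (List.range wc.length) := by
  have hn' : 0 < wc.length := List.length_pos_iff.mpr hn
  have hrne : List.range wc.length ≠ [] := by
    simp [List.range_eq_nil]
    omega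
  have hFMg := pvFsh_FM wc (List.range wc.length) hrne (List.pairwise_lt_range)
  set g := pvFsh wc (List.range wc.length) with hg
  have hglt : g < wc.length := List.mem_range.mp hFMg.1
  have hMis : pvMis wc q = wc.any (fun w => pvL wc q g < pvLcs w q) := by
    unfold pvMis
    rw [pvMin?_eq_fsh wc hn]
    simp only [Option.getD_some, pvSuf_eq]
    rfl
  have hany : pvMis wc q = false ↔ pvL wc q g = pvM wc q := by
    rw [hMis, List.any_eq_false]
    constructor
    · intro h
      obtain ⟨p, hp, hpv⟩ := pvM_mem wc q hn'
      have hmem : wc.getD p "" ∈ wc := (pvMem_iff wc _).mpr ⟨p, hp, rfl⟩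
      have := h _ hmem
      have hLe := pvL_le_M wc q g hglt
      simp only [decide_eq_true_eq] at this
      have : ¬ (pvL wc q g < pvL wc q p) := this
      omega
    · intro h w hw
      obtain ⟨i, hi, hv⟩ := (pvMem_iff wc w).mp hw
      have : pvLcs w q = pvL wc q i := by rw [← hv]; rfl
      have hLe := pvL_le_M wc q i hi
      simp only [decide_eq_true_eq]
      omega
  rw [hany]
  have hSne := pvSM_nonempty wc q hn
  have hFMS := pvFsh_FM wc (pvS wc q (pvM wc q)) hSne (pvS_pairwise wc q (pvM wc q))
  have hfS := (pvS_mem wc q).mp hFMS.1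
  have hfL : pvL wc q (pvFsh wc (pvS wc q (pvM wc q))) = pvM wc q :=
    le_antisymm (pvL_le_M wc q _ hfS.1) hfS.2
  constructor
  · intro hLg
    have hgS : g ∈ pvS wc q (pvM wc q) := (pvS_mem wc q).mpr ⟨hglt, by omega⟩
    have hFMgS : pvFM wc (pvS wc q (pvM wc q)) g := by
      refine ⟨hgS, ?_⟩
      intro x hx
      have hx' := (pvS_mem wc q).mp hx
      exact hFMg.2 x (List.mem_range.mpr hx'.1)
    exact pvFM_unique wc hFMS hFMgS
  · intro heq
    rw [← heq]
    exact hfL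

-- proof-side recursion equivalent to D_'s fold: scan the tail carrying the last nonempty query
def pvDrec (wc : List String) (cur : String) : List String → Bool
  | [] => false
  | q :: t => if q = "" then pvMis wc cur || pvDrec wc cur t else pvDrec wc q t

theorem pvDfold (wc : List String) : ∀ (t : List String) (cur : String) (b : Bool),
    (t.foldl (fun p q => if q = "" then (p.1, p.2 || pvMis wc p.1) else (q, p.2)) (cur, b)).2
      = (b || pvDrec wc cur t) := by
  intro t
  induction t with
  | nil => intro cur b; simp [pvDrec]
  | cons q t ih =>
    intro cur b
    by_cases h : q = "" <;> simp [pvDrec, h, ih, Bool.or_assoc]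

theorem pvD_iff (wc : List String) (q0 : String) (t : List String) (h : q0 ≠ "") :
    D_stringIndices wc (q0 :: t) ↔ pvDrec wc q0 t = true := by
  unfold D_stringIndices
  rw [List.foldl_cons]
  rw [show (if q0 = "" then ((("", false) : String × Bool).1, ("", false).2 || pvMis wc ("", false).1)
      else (q0, (("", false) : String × Bool).2)) = ((q0 : String), false) from by simp [h]]
  rw [pvDfold]
  simp

theorem pvD_nil (wc : List String) : ¬ D_stringIndices wc [] := by
  unfold D_stringIndices
  simp

-- B's port unrolled: the append fold is the map
theorem pvAlt_map (wc : List String) (wq : List String) :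
    stringIndices_alt wc wq = wq.map (fun q => pvBestFor wc q) := by
  have H : ∀ (l : List String) (acc : List Int),
      l.foldl (fun res q => res ++ [pvBestFor wc q]) acc = acc ++ l.map (fun q => pvBestFor wc q) := by
    intro l
    induction l with
    | nil => intro acc; simp
    | cons q t ih => intro acc; simp [ih]
  unfold stringIndices_alt
  simpa using H wq []

-- the model of A's answer list from a given stale candidate list S (the last nonempty query's)
def pvAnsList (wc : List String) (S : List Nat) : List String → List Int
  | [] => []
  | q :: t =>
    if q = "" then ((pvFsh wc S : Nat) : Int) :: pvAnsList wc S t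
    else ((pvFsh wc (pvS wc q (pvM wc q)) : Nat) : Int) :: pvAnsList wc (pvS wc q (pvM wc q)) t

theorem pvGoA_model (wc : List String) (hn : wc ≠ []) :
    ∀ (qs : List String) (cur : String),
      pvGoA wc qs (some (pvS wc cur (pvM wc cur))) = pvAnsList wc (pvS wc cur (pvM wc cur)) qs := by
  intro qs
  induction qs with
  | nil => intro cur; rfl
  | cons q t ih =>
    intro cur
    by_cases hq : q = ""
    · subst hq
      have hloop : pvLoopA wc ("" : String).toList (List.range wc.length)
          (some (pvS wc cur (pvM wc cur))) 0 = some (pvS wc cur (pvM wc cur)) := by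
        rw [pvLoopA, dif_neg (by simp)]
      rw [pvGoA, hloop]
      dsimp only
      rw [ih cur,
        pvPickA_eq_fsh wc _ (pvSM_nonempty wc cur hn) (pvS_pairwise wc cur (pvM wc cur))]
      rfl
    · rw [pvGoA, pvLoop_full wc q hn hq _]
      dsimp only
      rw [ih q,
        pvPickA_eq_fsh wc _ (pvSM_nonempty wc q hn) (pvS_pairwise wc q (pvM wc q))]
      simp [pvAnsList, hq]

-- B answers an empty query with the first shortest word of the whole container
theorem pvBestFor_empty (wc : List String) (hn : wc ≠ []) :
    pvBestFor wc "" = ((pvFsh wc (List.range wc.length) : Nat) : Int) := by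
  rw [pvBestFor_eq_fsh wc "" hn, pvM_empty, pvS_zero]

-- A's model agrees with B exactly when no empty tail query has a mismatching stale answer
theorem pvModel_iff (wc : List String) (hn : wc ≠ []) :
    ∀ (t : List String) (cur : String),
      (pvAnsList wc (pvS wc cur (pvM wc cur)) t = t.map (fun q => pvBestFor wc q)) ↔
        pvDrec wc cur t = false := by
  intro t
  induction t with
  | nil => intro cur; simp [pvAnsList, pvDrec]
  | cons q t ih =>
    intro cur
    by_cases hq : q = ""
    · subst hq
      rw [pvAnsList, if_pos rfl, pvDrec, if_pos rfl, List.map_cons]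
      rw [List.cons_eq_cons]
      rw [pvBestFor_empty wc hn]
      constructor
      · intro ⟨h1, h2⟩
        have hfsh : pvFsh wc (pvS wc cur (pvM wc cur)) = pvFsh wc (List.range wc.length) := by
          exact_mod_cast h1
        rw [(pvMis_iff wc cur hn).mpr hfsh, (ih cur).mp h2]
        rfl
      · intro h
        rw [Bool.or_eq_false_iff] at h
        have hfsh := (pvMis_iff wc cur hn).mp h.1
        exact ⟨by exact_mod_cast hfsh, (ih cur).mpr h.2⟩
    · rw [pvAnsList, if_neg hq, pvDrec, if_neg hq, List.map_cons]
      rw [List.cons_eq_cons]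
      rw [pvBestFor_eq_fsh wc q hn]
      constructor
      · intro ⟨_, h2⟩
        exact (ih q).mp h2
      · intro h
        exact ⟨rfl, (ih q).mpr h⟩

-- A's whole output under Pre_, in model form
theorem pvA_model (wc : List String) (q0 : String) (t : List String)
    (hn : wc ≠ []) (hq0 : q0 ≠ "") :
    stringIndices wc (q0 :: t) =
      ((pvFsh wc (pvS wc q0 (pvM wc q0)) : Nat) : Int) :: pvAnsList wc (pvS wc q0 (pvM wc q0)) t := by
  show pvGoA wc (q0 :: t) none = _
  rw [pvGoA, pvLoop_full wc q0 hn hq0 none]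
  dsimp only
  rw [pvGoA_model wc hn t q0,
    pvPickA_eq_fsh wc _ (pvSM_nonempty wc q0 hn) (pvS_pairwise wc q0 (pvM wc q0))]
  rfl

-- ===== VERDICT (by name: the statement is the Claim_ definition above) =====
theorem stringIndices_spec : Claim_unchanged_stringIndices := by
  unfold Claim_unchanged_stringIndices
  intro wc wq _ hpre
  unfold Spec_stringIndices
  intro hnD
  rcases hpre with h | ⟨hwc, hhead⟩
  · subst h; rfl
  · cases wq with
    | nil => rfl
    | cons q0 t =>
      have hq0 : q0 ≠ "" := by intro h; apply hhead; simp [h]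
      have hD : pvDrec wc q0 t = false := by
        cases hb : pvDrec wc q0 t with
        | false => rfl
        | true => exact absurd ((pvD_iff wc q0 t hq0).mpr hb) hnD
      rw [pvA_model wc q0 t hwc hq0, pvAlt_map, List.map_cons,
        (pvModel_iff wc hwc t q0).mpr hD, pvBestFor_eq_fsh wc q0 hwc]

theorem stringIndices_changed : Claim_changed_stringIndices := by
  unfold Claim_changed_stringIndices
  refine ⟨by decide, by decide, by decide, ?_, by decide, by decide⟩
  -- A's value at the witness, via the model (pvLoopA is well-founded, so `decide` cannot unfold it)
  show stringIndices ["ab", "b"] ["ab", ""] = [0, 0]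
  rw [pvA_model ["ab", "b"] "ab" [""] (by decide) (by decide)]
  decide

theorem stringIndices_tight : Claim_exact_stringIndices := by
  unfold Claim_exact_stringIndices
  intro wc wq _ hpre hD heq
  rcases hpre with h | ⟨hwc, hhead⟩
  · subst h
    exact pvD_nil wc hD
  · cases wq with
    | nil => exact pvD_nil wc hD
    | cons q0 t =>
      have hq0 : q0 ≠ "" := by intro h; apply hhead; simp [h]
      have hDrec : pvDrec wc q0 t = true := (pvD_iff wc q0 t hq0).mp hD
      rw [pvA_model wc q0 t hwc hq0, pvAlt_map, List.map_cons] at heq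
      have htail := (List.cons_eq_cons.mp heq).2
      have := (pvModel_iff wc hwc t q0).mp htail
      rw [hDrec] at this
      exact Bool.true_eq_false.mp this
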